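-- pv_equiv track=rewrite | github.com/NewUU-CS111-Fall2023/week-3-assignments-graphs-XusniddinQalandarov | src/py/problem_4.py | dfs
-- ===== SOURCE A (Python) =====
-- def dfs(fragments, visited, current_genome, min_genome):
--     # Base case: if all fragments are visited, check if the current genome is shorter than the minimum genome
--     if all(visited):
--         if len(current_genome) < len(min_genome):
--             return current_genome
--         return min_genome
--
--     # Iterate over each fragment
--     for i in range(len(fragments)):
--         # If the fragment is not visited
--         if not visited[i]:
--             # Mark the fragment as visited
--             visited[i] = True
--
--             # Check if the current genome already contains the fragment
--             if fragments[i] in current_genome: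
--                 # If it does, continue to the next fragment
--                 min_genome = dfs(fragments, visited, current_genome, min_genome)
--
--             else:
--                 # If it doesn't, append the fragment to the current genome
--                 min_genome = dfs(fragments, visited, current_genome + fragments[i], min_genome)
--
--             # Mark the fragment as unvisited for the next iteration
--             visited[i] = False
--
--     return min_genome
-- ===== SOURCE B (Python) =====
-- from itertools import permutations
--
--
-- def dfs(fragments, visited, current_genome, min_genome):
--     pending = [f for f, v in zip(fragments, visited) if not v]
--     best = min_genome
--     for perm in permutations(pending):
--         acc = current_genome
--         for frag in perm:
--             if frag not in acc:
--                 acc += frag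
--         if len(acc) < len(best):
--             best = acc
--     return best
-- ===== Notes on version B (the rewrite author's own statement) =====
-- stated objective: alternative
-- what changed: Replaces the mutating recursive backtracking DFS that threads min_genome through the call tree with a flat fold: zip out the not-yet-visited fragments once, iterate itertools.permutations of them in lexicographic order, rebuild the genome per permutation and keep the strictly shorter one.
-- outside the precondition, e.g. on dfs(['a'], [False, False], '', 'zz'): A returns 'zz', B returns 'a'
import Mathlib
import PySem

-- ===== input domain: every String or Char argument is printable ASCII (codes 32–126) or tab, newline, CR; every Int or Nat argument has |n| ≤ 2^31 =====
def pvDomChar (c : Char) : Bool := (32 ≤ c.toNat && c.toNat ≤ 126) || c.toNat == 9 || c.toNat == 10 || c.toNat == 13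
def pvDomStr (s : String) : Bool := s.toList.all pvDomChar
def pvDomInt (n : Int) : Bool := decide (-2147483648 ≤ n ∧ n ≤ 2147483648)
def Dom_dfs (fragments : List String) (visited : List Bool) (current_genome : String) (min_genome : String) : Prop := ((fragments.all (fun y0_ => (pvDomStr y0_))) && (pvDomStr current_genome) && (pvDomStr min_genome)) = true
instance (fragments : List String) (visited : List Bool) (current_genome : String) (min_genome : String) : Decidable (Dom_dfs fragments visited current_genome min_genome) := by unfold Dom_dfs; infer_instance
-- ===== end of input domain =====

-- B replaces A's mutating recursive DFS by a flat fold over the lexicographic permutations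
-- of the unvisited indices (objective: alternative, same exhaustive cost).
-- A mutates `visited` in place but always restores it before returning, so the caller sees
-- no net mutation; the equivalence is about the return value.

-- ===== PORT A =====
-- termination helper for the port (cited in decreasing_by)
lemma pv_count_false_set_lt (visited : List Bool) (i : Nat)
    (h : (!visited.getD i true) = true) :
    (visited.set i true).count false < visited.count false := by
  have hi : i < visited.length := by
    by_contra hge
    have : visited[i]? = none := List.getElem?_eq_none (by omega)
    simp [List.getD_eq_getElem?_getD, this] at h
  have hv : visited[i] = false := by
    simpa [List.getD_eq_getElem?_getD, List.getElem?_eq_getElem hi] using h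
  have hpos : 0 < visited.count false := by
    have : false ∈ visited := by
      exact (List.mem_iff_getElem).2 ⟨i, hi, hv⟩
    simpa using (List.count_pos_iff).2 this
  rw [List.count_set hi]
  simp only [hv, beq_self_eq_true, if_true, beq_iff_eq, Bool.true_eq_false, if_false]
  omega

mutual
-- literal transliteration of A: base case on all(visited), else the for-loop over
-- range(len(fragments)); the loop is the structural recursion dfsForLoop over that range list.
-- Where Python would raise IndexError (visited[i] with i ≥ len(visited), outside Pre_dfs)
-- the port reads the flag as `true` (index skipped).
def dfs (fragments : List String) (visited : List Bool) (current_genome : String) (min_genome : String) : String :=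
  if visited.all (fun b => b) then
    if PySem.Str.len current_genome < PySem.Str.len min_genome then current_genome
    else min_genome
  else
    dfsForLoop fragments visited current_genome (List.range fragments.length) min_genome
termination_by (visited.count false, fragments.length + 2)
decreasing_by
  exact Prod.Lex.right _ (by simp only [List.length_range]; omega)

def dfsForLoop (fragments : List String) (visited : List Bool) (current_genome : String) (idxs : List Nat) (min_genome : String) : String :=
  match idxs with
  | [] => min_genome
  | i :: rest =>
    if h : (!visited.getD i true) = true then
      let frag := fragments.getD i ""
      let min' := dfs fragments (visited.set i true)
        (if PySem.Str.isIn frag current_genome then current_genome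
         else current_genome ++ frag) min_genome
      dfsForLoop fragments visited current_genome rest min'
    else
      dfsForLoop fragments visited current_genome rest min_genome
termination_by (visited.count false, idxs.length + 1)
decreasing_by
  · exact Prod.Lex.left _ _ (pv_count_false_set_lt visited i h)
  · exact Prod.Lex.right _ (by simp only [List.length_cons]; omega)
  · exact Prod.Lex.right _ (by simp only [List.length_cons]; omega)
end

-- ===== PORT B =====
-- transliteration of Source B: zip out the not-yet-visited fragments, fold over
-- itertools.permutations of them (= PySem.List.permutations), rebuilding the genome
-- for each permutation and keeping the strictly shorter result.
def dfs_alt (fragments : List String) (visited : List Bool) (current_genome : String) (min_genome : String) : String :=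
  let pending := ((fragments.zip visited).filter (fun fv => !fv.2)).map (fun fv => fv.1)
  (PySem.List.permutations pending pending.length).foldl
    (fun best p =>
      let acc := p.foldl
        (fun acc frag =>
          if !PySem.Str.isIn frag acc then acc ++ frag
          else acc) current_genome
      if PySem.Str.len acc < PySem.Str.len best then acc else best)
    min_genome

-- ===== PRECONDITION & SPEC =====
-- Pre_dfs is the natural domain where visited parallels fragments (extra trailing True
-- flags, and any all-True visited, are harmless and admitted).  Excluded: a visited that
-- is shorter than fragments and not all True (A raises IndexError), and a
-- visited with an unvisited (False) flag beyond fragments' range — there A's search can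
-- never mark every flag, so A degenerately returns min_genome unchanged while B ignores
-- the out-of-range flag.
def Pre_dfs (fragments : List String) (visited : List Bool) (current_genome : String) (min_genome : String) : Prop :=
  (fragments.length ≤ visited.length ∧ ∀ b ∈ visited.drop fragments.length, b = true) ∨
    visited.all (fun b => b) = true
instance (fragments : List String) (visited : List Bool) (current_genome : String) (min_genome : String) : Decidable (Pre_dfs fragments visited current_genome min_genome) := by unfold Pre_dfs; infer_instance

def pvWitness_dfs : List String × List Bool × String × String :=
  (["ab", "ba"], [false, false], "", "zzzzz")

def Spec_dfs (fragments : List String) (visited : List Bool) (current_genome : String) (min_genome : String) (out : String) : Prop := out = dfs_alt fragments visited current_genome min_genome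
instance (fragments : List String) (visited : List Bool) (current_genome : String) (min_genome : String) (out : String) : Decidable (Spec_dfs fragments visited current_genome min_genome out) := by unfold Spec_dfs; infer_instance

-- ===== CLAIM (what is proved, stated in full; the proofs are below) =====
def Claim_equal_dfs : Prop := ∀ (fragments : List String) (visited : List Bool) (current_genome : String) (min_genome : String), Dom_dfs fragments visited current_genome min_genome → Pre_dfs fragments visited current_genome min_genome → Spec_dfs fragments visited current_genome min_genome (dfs fragments visited current_genome min_genome)

-- ===== LEMMAS AND PROOFS =====

-- the per-fragment accumulation step (A's spelling)
def pvStep (fragments : List String) (acc : String) (i : Nat) : String :=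
  if PySem.Str.isIn (fragments.getD i "") acc then acc else acc ++ fragments.getD i ""

-- the per-permutation leaf step
def pvLeaf (fragments : List String) (cg : String) (best : String) (p : List Nat) : String :=
  if PySem.Str.len (p.foldl (pvStep fragments) cg) < PySem.Str.len best then
    p.foldl (pvStep fragments) cg
  else best

-- the unvisited indices, in increasing order
def pvUnvis (fragments : List String) (visited : List Bool) : List Nat :=
  (List.range fragments.length).filter (fun i => !visited.getD i true)

lemma pvStepB_eq (fragments : List String) (i : Nat) (acc : String) :
    (if !PySem.Str.isIn (fragments.getD i "") acc then acc ++ fragments.getD i ""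
     else acc) = pvStep fragments acc i := by
  unfold pvStep
  cases PySem.Str.isIn (fragments.getD i "") acc <;> simp

lemma pv_loop_eq (fragments : List String) (visited : List Bool) (cg : String) :
    ∀ (idxs : List Nat) (mg : String),
      dfsForLoop fragments visited cg idxs mg =
        (idxs.filter (fun i => !visited.getD i true)).foldl
          (fun mg j => dfs fragments (visited.set j true) (pvStep fragments cg j) mg) mg := by
  intro idxs
  induction idxs with
  | nil => intro mg; simp [dfsForLoop]
  | cons i rest ih =>
    intro mg
    by_cases h : (!visited.getD i true) = true
    · rw [dfsForLoop]
      simp only [h, dite_true, List.filter_cons]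
      rw [ih]
      rfl
    · rw [dfsForLoop]
      simp only [h, List.filter_cons]
      exact ih mg

lemma pv_perm_unfold {α : Type} (l : List α) (r : Nat) :
    PySem.List.permutations l (r + 1) =
      (List.range l.length).flatMap (fun i =>
        l[i]?.elim [] (fun x => (PySem.List.permutations (l.eraseIdx i) r).map (x :: ·))) := by
  rw [PySem.List.permutations]
  apply List.flatMap_congr
  intro i _
  cases l[i]? <;> rfl

lemma pv_flatMap_range {β : Type} :
    ∀ (l : List Nat), l.Nodup → ∀ (F : Nat → List Nat → List β),
      (List.range l.length).flatMap (fun i =>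
        l[i]?.elim [] (fun x => F x (l.eraseIdx i))) =
      l.flatMap (fun j => F j (l.erase j)) := by
  intro l
  induction l with
  | nil => intro _ F; simp
  | cons x xs ih =>
    intro hnd F
    have hx : x ∉ xs := (List.nodup_cons.1 hnd).1
    rw [List.length_cons, List.range_succ_eq_map, List.flatMap_cons, List.flatMap_map]
    have h0 : (x :: xs)[0]? = some x := rfl
    have htail :
        (List.range xs.length).flatMap
            (fun i => (x :: xs)[i+1]?.elim ([] : List β)
              (fun y => F y ((x :: xs).eraseIdx (i+1)))) =
          xs.flatMap (fun j => F j (x :: xs.erase j)) := by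
      have hih := ih (List.nodup_cons.1 hnd).2 (fun y t => F y (x :: t))
      rw [← hih]
      apply List.flatMap_congr
      intro i _
      simp only [List.getElem?_cons_succ, List.eraseIdx_cons_succ]
    rw [List.flatMap_cons]
    simp only [h0, List.eraseIdx_cons_zero, Nat.succ_eq_add_one, Option.elim_some]
    congr 1
    · simp [List.erase_cons_head]
    · rw [htail]
      apply List.flatMap_congr
      intro j hj
      have hxj : (x :: xs).erase j = x :: xs.erase j := by
        rw [List.erase_cons]
        simp [show ¬ x = j from fun h => hx (h ▸ hj)]
      rw [hxj]

lemma pv_unvis_nodup (fragments : List String) (visited : List Bool) :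
    (pvUnvis fragments visited).Nodup :=
  (List.nodup_range).filter _

lemma pv_unvis_set (fragments : List String) (visited : List Bool) (j : Nat)
    (hj : j ∈ pvUnvis fragments visited) :
    pvUnvis fragments (visited.set j true) = (pvUnvis fragments visited).erase j := by
  have hnd : (pvUnvis fragments visited).Nodup := pv_unvis_nodup fragments visited
  have hj' : j < fragments.length ∧ visited[j]?.getD true = false := by
    simpa [pvUnvis, List.getD_eq_getElem?_getD, List.mem_filter] using hj
  have hjlen : j < visited.length := by
    by_contra hge
    have h0 : visited[j]? = none := List.getElem?_eq_none (by omega)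
    rw [h0] at hj'
    simp at hj'
  rw [hnd.erase_eq_filter j]
  unfold pvUnvis
  rw [List.filter_filter]
  apply List.filter_congr
  intro i _
  by_cases hij : i = j
  · subst hij
    simp [List.getD_eq_getElem?_getD, List.getElem?_set_self hjlen]
  · have hne : (visited.set j true)[i]? = visited[i]? := List.getElem?_set_ne (by omega)
    simp [List.getD_eq_getElem?_getD, hne, hij]

lemma pv_unvis_eq_nil (fragments : List String) (visited : List Bool)
    (hall : visited.all (fun b => b) = true) (hlen : fragments.length ≤ visited.length) :
    pvUnvis fragments visited = [] := by
  unfold pvUnvis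
  rw [List.filter_eq_nil_iff]
  intro i hi
  have hilen : i < visited.length := lt_of_lt_of_le (List.mem_range.1 hi) hlen
  have : visited[i] = true := (List.all_eq_true).1 hall _ (visited.getElem_mem hilen)
  simp [List.getD_eq_getElem?_getD, List.getElem?_eq_getElem hilen, this]

lemma pv_base (fragments : List String) (visited : List Bool) (cg mg : String)
    (hall : visited.all (fun b => b) = true) (hlen : fragments.length ≤ visited.length) :
    dfs fragments visited cg mg =
      (PySem.List.permutations (pvUnvis fragments visited)
          (pvUnvis fragments visited).length).foldl (pvLeaf fragments cg) mg := by
  rw [dfs, if_pos hall, pv_unvis_eq_nil fragments visited hall hlen]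
  show _ = List.foldl (pvLeaf fragments cg) mg [[]]
  simp only [List.foldl_cons, List.foldl_nil, pvLeaf]

lemma pv_main (fragments : List String) :
    ∀ (n : Nat) (visited : List Bool), visited.count false ≤ n →
      fragments.length ≤ visited.length →
      (∀ b ∈ visited.drop fragments.length, b = true) →
      ∀ (cg mg : String),
        dfs fragments visited cg mg =
          (PySem.List.permutations (pvUnvis fragments visited)
              (pvUnvis fragments visited).length).foldl (pvLeaf fragments cg) mg := by
  intro n
  induction n with
  | zero =>
    intro visited hc hlen hdrop cg mg
    have hall : visited.all (fun b => b) = true := by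
      rw [List.all_eq_true]
      intro b hb
      cases b with
      | true => rfl
      | false =>
        have := (List.count_pos_iff).2 hb
        omega
    exact pv_base fragments visited cg mg hall hlen
  | succ n ih =>
    intro visited hc hlen hdrop cg mg
    by_cases hall : visited.all (fun b => b) = true
    · exact pv_base fragments visited cg mg hall hlen
    · -- some index is unvisited
      have hex : ∃ k, k ∈ pvUnvis fragments visited := by
        rw [List.all_eq_true] at hall
        push Not at hall
        obtain ⟨b, hb, hbne⟩ := hall
        have hbfalse : b = false := by cases b <;> simp_all
        subst hbfalse
        obtain ⟨k, hk, hbk⟩ := (List.mem_iff_getElem).1 hb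
        have hkf : k < fragments.length := by
          by_contra hge
          have hkd : k - fragments.length < (visited.drop fragments.length).length := by
            rw [List.length_drop]; omega
          have hgd : (visited.drop fragments.length)[k - fragments.length] = visited[k] := by
            rw [List.getElem_drop]; congr 1; omega
          have hmem : visited[k] ∈ visited.drop fragments.length := hgd ▸ List.getElem_mem hkd
          have htrue := hdrop _ hmem
          rw [hbk] at htrue
          cases htrue
        refine ⟨k, ?_⟩
        unfold pvUnvis
        rw [List.mem_filter, List.mem_range]
        exact ⟨hkf, by simp [List.getD_eq_getElem?_getD, List.getElem?_eq_getElem hk, hbk]⟩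
      obtain ⟨k0, hk0⟩ := hex
      obtain ⟨m, hm⟩ : ∃ m, (pvUnvis fragments visited).length = m + 1 := by
        cases hu : pvUnvis fragments visited with
        | nil => rw [hu] at hk0; simp at hk0
        | cons a as => exact ⟨as.length, by simp [hu]⟩
      rw [dfs, if_neg hall, pv_loop_eq]
      rw [hm, pv_perm_unfold, pv_flatMap_range _ (pv_unvis_nodup fragments visited)
        (fun x t => (PySem.List.permutations t m).map (x :: ·)), List.foldl_flatMap]
      apply PySem.List.foldl_congr_mem
      intro mg' j hj
      rw [List.foldl_map]
      have hleaf : (fun (best : String) (p : List Nat) => pvLeaf fragments cg best (j :: p)) =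
          pvLeaf fragments (pvStep fragments cg j) := by
        funext best p
        simp only [pvLeaf, List.foldl_cons]
      rw [hleaf]
      have hjp : (!visited.getD j true) = true := by
        have := List.mem_filter.1 hj
        exact this.2
      have hjf : j < fragments.length := List.mem_range.1 (List.mem_filter.1 hj).1
      have hcount : (visited.set j true).count false ≤ n := by
        have := pv_count_false_set_lt visited j hjp
        omega
      have hdrop' : ∀ b ∈ (visited.set j true).drop fragments.length, b = true := by
        intro b hb
        rw [List.drop_set] at hb
        rw [if_pos (by omega)] at hb
        exact hdrop b hb
      have := ih (visited.set j true) hcount (by rw [List.length_set]; exact hlen) hdrop' (pvStep fragments cg j) mg'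
      rw [this, pv_unvis_set fragments visited j hj]
      have hj2 : j ∈ pvUnvis fragments visited := hj
      congr 1
      rw [List.length_erase_of_mem hj2, hm]
      rfl

lemma pv_zip_eq (fragments : List String) (visited : List Bool)
    (h : fragments.length ≤ visited.length) :
    fragments.zip visited =
      (List.range fragments.length).map
        (fun i => (fragments.getD i "", visited.getD i true)) := by
  apply List.ext_getElem
  · simp [List.length_zip]
    omega
  · intro i h1 h2
    have hif : i < fragments.length := by
      simp [List.length_zip] at h1
      omega
    have hiv : i < visited.length := by omega
    simp [List.getElem_zip, List.getElem_range, List.getD_eq_getElem?_getD,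
      List.getElem?_eq_getElem hif, List.getElem?_eq_getElem hiv]

lemma pv_pending_eq (fragments : List String) (visited : List Bool)
    (h : fragments.length ≤ visited.length) :
    ((fragments.zip visited).filter (fun fv => !fv.2)).map (fun fv => fv.1) =
      (pvUnvis fragments visited).map (fun i => fragments.getD i "") := by
  rw [pv_zip_eq fragments visited h, List.filter_map, List.map_map]
  unfold pvUnvis
  rfl

lemma pv_perm_map {α β : Type} (g : α → β) :
    ∀ (r : Nat) (l : List α),
      PySem.List.permutations (l.map g) r =
        (PySem.List.permutations l r).map (List.map g) := by
  intro r
  induction r with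
  | zero => intro l; rfl
  | succ r ih =>
    intro l
    rw [pv_perm_unfold, pv_perm_unfold, List.map_flatMap, List.length_map]
    apply List.flatMap_congr
    intro i _
    rw [List.getElem?_map]
    cases l[i]? with
    | none => rfl
    | some x =>
      simp only [Option.map_some, Option.elim_some]
      rw [List.eraseIdx_map, ih, List.map_map, List.map_map]
      apply List.map_congr_left
      intro p _
      rfl

lemma pv_alt_eq (fragments : List String) (visited : List Bool) (cg mg : String)
    (h : fragments.length ≤ visited.length) :
    dfs_alt fragments visited cg mg =
      (PySem.List.permutations (pvUnvis fragments visited)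
          (pvUnvis fragments visited).length).foldl (pvLeaf fragments cg) mg := by
  simp only [dfs_alt]
  rw [pv_pending_eq fragments visited h,
    pv_perm_map (fun i => fragments.getD i ""), List.length_map, List.foldl_map]
  apply PySem.List.foldl_congr_mem
  intro best p _
  show (if PySem.Str.len ((p.map (fun i => fragments.getD i "")).foldl
          (fun acc frag => if !PySem.Str.isIn frag acc then acc ++ frag else acc) cg) <
          PySem.Str.len best then
        (p.map (fun i => fragments.getD i "")).foldl
          (fun acc frag => if !PySem.Str.isIn frag acc then acc ++ frag else acc) cg
      else best) = pvLeaf fragments cg best p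
  rw [List.foldl_map]
  have hstep : p.foldl (fun acc i =>
      if !PySem.Str.isIn (fragments.getD i "") acc then acc ++ fragments.getD i ""
      else acc) cg = p.foldl (pvStep fragments) cg := by
    apply PySem.List.foldl_congr_mem
    intro acc i _
    exact pvStepB_eq fragments i acc
  rw [hstep]
  rfl

lemma pv_alt_all (fragments : List String) (visited : List Bool) (cg mg : String)
    (hall : visited.all (fun b => b) = true) :
    dfs_alt fragments visited cg mg =
      if PySem.Str.len cg < PySem.Str.len mg then cg else mg := by
  simp only [dfs_alt]
  have hnil : (fragments.zip visited).filter (fun fv => !fv.2) = [] := by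
    rw [List.filter_eq_nil_iff]
    intro fv hfv
    have hv : fv.2 ∈ visited := (List.of_mem_zip (a := fv.1) (b := fv.2) (by simpa using hfv)).2
    have := (List.all_eq_true).1 hall _ hv
    simp [this]
  rw [hnil]
  rfl

-- ===== VERDICT (by name: the statement is the Claim_ definition above) =====
theorem dfs_spec : Claim_equal_dfs := by
  intro fragments visited cg mg _ hpre
  unfold Spec_dfs
  by_cases hall : visited.all (fun b => b) = true
  · rw [pv_alt_all fragments visited cg mg hall, dfs, if_pos hall]
  · have hpre' : fragments.length ≤ visited.length ∧
        ∀ b ∈ visited.drop fragments.length, b = true := by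
      rcases hpre with h | h
      · exact h
      · exact absurd h hall
    rw [pv_alt_eq fragments visited cg mg hpre'.1]
    exact pv_main fragments (visited.count false) visited le_rfl hpre'.1 hpre'.2 cg mg
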